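-- pv_equiv track=rewrite | github.com/karmaresearch/takco | takco/reshape/findpivot.py | get_colspan_fromto
-- ===== SOURCE A (Python) =====
-- from typing import (
--     List,
--     Tuple,
--     NamedTuple,
--     Iterable,
--     Dict,
--     Optional,
--     Set,
--     Collection,
--     Pattern,
-- )
--
-- def get_colspan_fromto(rows: List[List[str]]) -> List[List[Tuple[int, int]]]:
--     """Gets colspan (from,to) index of every cell"""
--     fromto = []
--     for row in rows:
--         fr, to = [], [] # type: ignore
--         _cell = None
--         for ci, cell in enumerate(row):
--             if fr and cell == _cell:
--                 fr.append(fr[ci - 1])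
--                 to.append(ci)
--                 for cj, t in enumerate(to):
--                     if t == ci - 1:
--                         to[cj] = ci
--             else:
--                 fr.append(ci)
--                 to.append(ci)
--             _cell = cell
--         fromto.append(list(zip(fr, to)))
--     return fromto
-- ===== SOURCE B (Python) =====
-- def get_colspan_fromto(rows):
--     """Gets colspan (from,to) index of every cell"""
--     fromto = []
--     for row in rows:
--         ft = []
--         i, n = 0, len(row)
--         while i < n:
--             j = i + 1
--             while j < n and row[j] == row[i]:
--                 j += 1
--             ft.extend([(i, j - 1)] * (j - i))
--             i = j
--         fromto.append(ft)
--     return fromto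
-- ===== Notes on version B (the rewrite author's own statement) =====
-- stated objective: alternative
-- what changed: Per row, A appends per cell and rescans the whole 'to' list rewriting the current run's entries at every extension; B instead groups consecutive equal cells into runs with a two-pointer pass and emits (start,end) once per run (worst-case O(m^2) vs O(m) per row, but not measurably faster on the random timing inputs).
import Mathlib
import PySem

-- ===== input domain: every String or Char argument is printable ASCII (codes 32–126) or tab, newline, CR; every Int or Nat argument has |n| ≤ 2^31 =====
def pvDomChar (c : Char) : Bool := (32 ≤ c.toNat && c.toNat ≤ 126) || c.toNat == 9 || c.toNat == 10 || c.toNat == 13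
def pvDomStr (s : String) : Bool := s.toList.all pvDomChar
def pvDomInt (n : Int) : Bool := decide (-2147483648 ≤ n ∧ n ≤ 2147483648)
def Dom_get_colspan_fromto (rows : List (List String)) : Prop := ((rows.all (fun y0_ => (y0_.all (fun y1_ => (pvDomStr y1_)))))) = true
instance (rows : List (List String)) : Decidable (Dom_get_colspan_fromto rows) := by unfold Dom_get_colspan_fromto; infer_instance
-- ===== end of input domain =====

-- B groups consecutive equal cells into runs with a two-pointer pass, instead of A's
-- append-and-rescan bookkeeping that rewrites the current run's 'to' entries at each step.

-- ===== PORT A =====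
-- inner loop body of A: state (fr, to, _cell), one enumerated cell (ci, cell)
def pvAStep (acc : List Int × List Int × Option String) (p : Int × String) :
    List Int × List Int × Option String :=
  if acc.1 ≠ [] ∧ acc.2.2 = some p.2 then
    -- fr.append(fr[ci-1]) : index ci-1 is always in range here (fr ≠ [] and len(fr) = ci)
    (acc.1 ++ [PySem.List.pyGetD acc.1 (p.1 - 1) 0],
     (acc.2.1 ++ [p.1]).map (fun t => if t = p.1 - 1 then p.1 else t),
     some p.2)
  else
    (acc.1 ++ [p.1], acc.2.1 ++ [p.1], some p.2)

def pvARow (row : List String) : List (Int × Int) :=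
  let st := (PySem.List.enumerate row 0).foldl pvAStep ([], [], none)
  st.1.zip st.2.1

def get_colspan_fromto (rows : List (List String)) : List (List (Int × Int)) :=
  rows.foldl (fun fromto row => fromto ++ [pvARow row]) []

-- ===== PORT B =====
-- Source B's two-pointer while loop: take the run starting at index i, emit it, continue after it
def pvBRow (i : Nat) : List String → List (Int × Int)
  | [] => []
  | x :: xs =>
    let len := 1 + (xs.takeWhile (fun y => y == x)).length
    List.replicate len ((i : Int), (i : Int) + (len : Int) - 1) ++
      pvBRow (i + len) (xs.dropWhile (fun y => y == x))
termination_by l => l.length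
decreasing_by
  have := List.length_dropWhile_le (fun y => y == x) xs
  simp only [List.length_cons]; omega

def get_colspan_fromto_alt (rows : List (List String)) : List (List (Int × Int)) :=
  rows.map (pvBRow 0)

-- ===== PRECONDITION & SPEC =====
def Spec_get_colspan_fromto (rows : List (List String)) (out : List (List (Int × Int))) : Prop := out = get_colspan_fromto_alt rows
instance (rows : List (List String)) (out : List (List (Int × Int))) : Decidable (Spec_get_colspan_fromto rows out) := by unfold Spec_get_colspan_fromto; infer_instance

-- ===== CLAIM (what is proved, stated in full; the proofs are below) =====
def Claim_equal_get_colspan_fromto : Prop := ∀ (rows : List (List String)), Dom_get_colspan_fromto rows → Spec_get_colspan_fromto rows (get_colspan_fromto rows)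

-- ===== LEMMAS AND PROOFS =====

-- B's result for a suffix l entered "mid-run": the current run has start s, length-so-far m,
-- cell value c, and the next cell index is k; the run is first extended by l's matching prefix.
def pvCont (s : Int) (m k : Nat) (c : String) (l : List String) : List (Int × Int) :=
  List.replicate (m + (l.takeWhile (fun y => y == c)).length)
    (s, (k : Int) + ((l.takeWhile (fun y => y == c)).length : Int) - 1) ++
  pvBRow (k + (l.takeWhile (fun y => y == c)).length) (l.dropWhile (fun y => y == c))

theorem pvCont_nil (s : Int) (m k : Nat) (c : String) :
    pvCont s m k c [] = List.replicate m (s, (k : Int) - 1) := by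
  simp [pvCont, pvBRow]

theorem pvBRow_cons (k : Nat) (x : String) (xs : List String) :
    pvBRow k (x :: xs) = pvCont (k : Int) 1 (k + 1) x xs := by
  simp only [pvBRow, pvCont]
  have h1 : (k : Int) + ((1 + (xs.takeWhile (fun y => y == x)).length : Nat) : Int) - 1
      = ((k + 1 : Nat) : Int) + (((xs.takeWhile (fun y => y == x)).length : Nat) : Int) - 1 := by
    push_cast; ring
  have h2 : k + (1 + (xs.takeWhile (fun y => y == x)).length)
      = (k + 1) + (xs.takeWhile (fun y => y == x)).length := by omega
  rw [h1, h2]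

theorem pvCont_pos (s : Int) (m k : Nat) (c : String) (xs : List String) :
    pvCont s m k c (c :: xs) = pvCont s (m + 1) (k + 1) c xs := by
  simp only [pvCont, List.takeWhile_cons, List.dropWhile_cons, beq_self_eq_true, if_true,
    List.length_cons]
  have h1 : m + ((xs.takeWhile (fun y => y == c)).length + 1)
      = (m + 1) + (xs.takeWhile (fun y => y == c)).length := by omega
  have h2 : (k : Int) + (((xs.takeWhile (fun y => y == c)).length + 1 : Nat) : Int) - 1
      = ((k + 1 : Nat) : Int) + (((xs.takeWhile (fun y => y == c)).length : Nat) : Int) - 1 := by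
    push_cast; ring
  have h3 : k + ((xs.takeWhile (fun y => y == c)).length + 1)
      = (k + 1) + (xs.takeWhile (fun y => y == c)).length := by omega
  rw [h1, h2, h3]

theorem pvCont_neg (s : Int) (m k : Nat) (c x : String) (xs : List String) (hx : ¬ x = c) :
    pvCont s m k c (x :: xs) = List.replicate m (s, (k : Int) - 1) ++ pvBRow k (x :: xs) := by
  have hb : (x == c) = false := beq_eq_false_iff_ne.mpr hx
  simp [pvCont, hb]

-- loop invariant for A's inner fold: after processing the prefix, fr/to consist of a settled
-- part (frPrev/toPrev) followed by the current run of length m starting at s with cell c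
theorem pvFoldA (l : List String) : ∀ (frPrev toPrev : List Int) (s : Int) (m : Nat) (c : String),
    1 ≤ m → frPrev.length = toPrev.length → (∀ t ∈ toPrev, t < (frPrev.length : Int)) →
    (let st := (PySem.List.enumerate l ((frPrev.length + m : Nat) : Int)).foldl pvAStep
        (frPrev ++ List.replicate m s,
         toPrev ++ List.replicate m (((frPrev.length + m : Nat) : Int) - 1), some c);
     st.1.zip st.2.1)
    = frPrev.zip toPrev ++ pvCont s m (frPrev.length + m) c l := by
  induction l with
  | nil =>
    intro frPrev toPrev s m c hm hlen hto
    simp only [PySem.List.enumerate_nil, List.foldl_nil, pvCont_nil]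
    rw [List.zip_append hlen, List.zip_replicate']
  | cons x xs ih =>
    intro frPrev toPrev s m c hm hlen hto
    rw [PySem.List.enumerate_cons, List.foldl_cons]
    by_cases hx : x = c
    · -- cell equals previous: the run is extended
      subst hx
      have hstep : pvAStep
          (frPrev ++ List.replicate m s,
           toPrev ++ List.replicate m (((frPrev.length + m : Nat) : Int) - 1), some x)
          (((frPrev.length + m : Nat) : Int), x)
          = (frPrev ++ List.replicate (m + 1) s,
             toPrev ++ List.replicate (m + 1) (((frPrev.length + (m + 1) : Nat) : Int) - 1),
             some x) := by
        rw [pvAStep]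
        rw [if_pos ⟨by simp; omega, rfl⟩]
        dsimp only
        have hidx : ((frPrev.length + m : Nat) : Int) - 1 = ((frPrev.length + m - 1 : Nat) : Int) := by
          omega
        have hget : PySem.List.pyGetD (frPrev ++ List.replicate m s)
            (((frPrev.length + m : Nat) : Int) - 1) 0 = s := by
          rw [hidx, PySem.List.pyGetD_natCast]
          rw [List.getD, List.getElem?_append_right (by omega)]
          have : frPrev.length + m - 1 - frPrev.length = m - 1 := by omega
          rw [this, List.getElem?_replicate, if_pos (by omega)]
          rfl
        rw [hget]
        refine Prod.ext ?_ (Prod.ext ?_ rfl)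
        · show frPrev ++ List.replicate m s ++ [s] = frPrev ++ List.replicate (m + 1) s
          rw [List.append_assoc, ← List.replicate_succ']
        · show ((toPrev ++ List.replicate m (((frPrev.length + m : Nat) : Int) - 1)) ++
              [((frPrev.length + m : Nat) : Int)]).map
              (fun t => if t = ((frPrev.length + m : Nat) : Int) - 1
                        then ((frPrev.length + m : Nat) : Int) else t)
            = toPrev ++ List.replicate (m + 1) (((frPrev.length + (m + 1) : Nat) : Int) - 1)
          have h1 : toPrev.map
              (fun t => if t = ((frPrev.length + m : Nat) : Int) - 1
                        then ((frPrev.length + m : Nat) : Int) else t) = toPrev := by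
            conv_rhs => rw [← List.map_id toPrev]
            refine List.map_congr_left ?_
            intro t ht
            have ht' := hto t ht
            simp only [id]
            rw [if_neg (by omega)]
          simp only [List.map_append, List.map_replicate, List.map_cons, List.map_nil]
          rw [h1]
          simp only [if_true, ite_self]
          have h3 : ((frPrev.length + (m + 1) : Nat) : Int) - 1 = ((frPrev.length + m : Nat) : Int) := by
            omega
          rw [h3, List.append_assoc, ← List.replicate_succ']
      rw [hstep]
      have harg : ((frPrev.length + m : Nat) : Int) + 1 = ((frPrev.length + (m + 1) : Nat) : Int) := by
        omega
      rw [harg]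
      rw [ih frPrev toPrev s (m + 1) x (by omega) hlen hto]
      rw [pvCont_pos, ← Nat.add_assoc]
    · -- new cell: a fresh run of length 1 starts at index frPrev.length + m
      have hstep : pvAStep
          (frPrev ++ List.replicate m s,
           toPrev ++ List.replicate m (((frPrev.length + m : Nat) : Int) - 1), some c)
          (((frPrev.length + m : Nat) : Int), x)
          = ((frPrev ++ List.replicate m s) ++ List.replicate 1 ((frPrev.length + m : Nat) : Int),
             (toPrev ++ List.replicate m (((frPrev.length + m : Nat) : Int) - 1)) ++
               List.replicate 1 ((((frPrev.length + m) + 1 : Nat) : Int) - 1),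
             some x) := by
        rw [pvAStep, if_neg (by simp; intro _ h; exact hx h.symm)]
        dsimp only
        refine Prod.ext rfl (Prod.ext ?_ rfl)
        show toPrev ++ List.replicate m (((frPrev.length + m : Nat) : Int) - 1) ++
            [((frPrev.length + m : Nat) : Int)] = _
        congr 1
        simp only [List.replicate_one]
        congr 1
        omega
      rw [hstep]
      have hlen' : (frPrev ++ List.replicate m s).length =
          (toPrev ++ List.replicate m (((frPrev.length + m : Nat) : Int) - 1)).length := by
        simp [hlen]
      have hto' : ∀ t ∈ toPrev ++ List.replicate m (((frPrev.length + m : Nat) : Int) - 1),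
          t < (((frPrev ++ List.replicate m s).length : Nat) : Int) := by
        intro t ht
        simp only [List.mem_append, List.mem_replicate] at ht
        simp only [List.length_append, List.length_replicate]
        rcases ht with h | ⟨_, h⟩
        · have := hto t h; push_cast at this ⊢; omega
        · subst h; push_cast; omega
      have harg : ((frPrev.length + m : Nat) : Int) + 1 =
          (((frPrev ++ List.replicate m s).length + 1 : Nat) : Int) := by
        simp
      rw [harg]
      have hmid : (((frPrev ++ List.replicate m s).length + 1 : Nat) : Int) - 1 =
          ((frPrev.length + m : Nat) : Int) := by simp
      have := ih (frPrev ++ List.replicate m s)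
          (toPrev ++ List.replicate m (((frPrev.length + m : Nat) : Int) - 1))
          ((frPrev.length + m : Nat) : Int) 1 x (le_refl 1) hlen' hto'
      simp only [List.length_append, List.length_replicate] at this ⊢
      rw [this]
      rw [List.zip_append hlen, List.zip_replicate']
      rw [pvCont_neg s m (frPrev.length + m) c x xs hx]
      rw [pvBRow_cons]
      simp [List.append_assoc]
  
theorem pvRow_eq (row : List String) : pvARow row = pvBRow 0 row := by
  cases row with
  | nil => simp [pvARow, pvBRow, PySem.List.enumerate_nil]
  | cons x xs =>
    rw [pvARow]
    rw [PySem.List.enumerate_cons, List.foldl_cons]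
    have hstep : pvAStep ([], [], none) ((0 : Int), x)
        = (([] : List Int) ++ List.replicate 1 (0 : Int),
           ([] : List Int) ++ List.replicate 1 ((((0:Nat) + 1 : Nat) : Int) - 1), some x) := by
      rw [pvAStep, if_neg (by simp)]
      simp
    rw [hstep]
    have := pvFoldA xs ([] : List Int) ([] : List Int) (0 : Int) 1 x (le_refl 1) rfl
      (by intro t ht; simp at ht)
    simp only [List.length_nil, zero_add, Nat.cast_one] at this ⊢
    rw [this]
    rw [pvBRow_cons]
    simp

-- ===== VERDICT (by name: the statement is the Claim_ definition above) =====
theorem get_colspan_fromto_spec : Claim_equal_get_colspan_fromto := by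
  intro rows _
  unfold Spec_get_colspan_fromto get_colspan_fromto get_colspan_fromto_alt
  have := PySem.List.foldl_append_singleton_eq_map pvARow rows ([] : List (List (Int × Int)))
  rw [this]
  simp only [List.nil_append]
  exact List.map_congr_left (fun row _ => pvRow_eq row)
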